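-- pv_equiv track=rewrite | github.com/oskar-anderson/iti0102-2018 | pr14_exam/exam.py | add_or_subtract
-- ===== SOURCE A (Python) =====
-- def add_or_subtract(numbers):
--     """
--     Return the sum of all numbers in a list.
--
--     The sum is calculated according to following rules:
--         -always start by adding all the numbers together.
--         -if you find a 0, start subtracting all following numbers until you find another 0, then start adding again.
--         -there might be more than two 0 in a list - change +/- with every 0 you find.
--
--     For example:
--         [1, 2, 0, 3, 0, 4] -> 1 + 2 - 3 + 4 = 4
--         [0, 2, 1, 0, 1, 0, 2] -> -2 - 1 + 1 - 2 = -4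
--         [1, 2] -> 1 + 2 = 3
--         [4, 0, 2, 3] = 4 - 2 - 3 = -1
--
--     #2
--
--     :param numbers: the list of number given.
--     :return: the sum of all numbers.
--     """
--     zero_index = 0
--     sum_of_numbers = 0
--     for number in numbers:
--         if number == 0:
--             zero_index += 1
--         if zero_index % 2 == 0:
--             sum_of_numbers += number
--         if zero_index % 2 == 1:
--             sum_of_numbers -= number
--     return sum_of_numbers
-- ===== SOURCE B (Python) =====
-- def add_or_subtract(numbers):
--     """Sum with sign toggled at each zero: flush per-segment subtotals with alternating signs."""
--     total = 0
--     subtotal = 0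
--     sign = 1
--     for n in numbers:
--         if n == 0:
--             total += sign * subtotal
--             subtotal = 0
--             sign = -sign
--         else:
--             subtotal += n
--     return total + sign * subtotal
-- ===== Notes on version B (the rewrite author's own statement) =====
-- stated objective: simpler
-- what changed: Replaces A's zero-counter with mod-2 parity tests and three per-element branches by a maintained sign and per-segment subtotal that is flushed into the total at each zero and once after the loop.
import Mathlib
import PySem

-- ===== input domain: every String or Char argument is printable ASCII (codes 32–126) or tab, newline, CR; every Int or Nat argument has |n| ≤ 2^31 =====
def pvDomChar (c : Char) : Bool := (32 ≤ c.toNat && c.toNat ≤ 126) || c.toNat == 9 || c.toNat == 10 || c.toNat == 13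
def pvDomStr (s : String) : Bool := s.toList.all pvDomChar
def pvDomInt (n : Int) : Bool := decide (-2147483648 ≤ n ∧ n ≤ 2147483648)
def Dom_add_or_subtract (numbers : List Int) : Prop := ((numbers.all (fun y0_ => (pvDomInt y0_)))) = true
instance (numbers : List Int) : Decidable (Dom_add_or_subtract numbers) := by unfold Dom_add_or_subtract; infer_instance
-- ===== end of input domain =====

-- B replaces A's zero-counter parity with a maintained sign and per-segment subtotal flushed at each zero (objective: simpler).


-- ===== PORT A =====
-- Port of A: fold carrying (zero_index, sum_of_numbers), three sequential ifs per element.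
def add_or_subtract (numbers : List Int) : Int :=
  (numbers.foldl (fun (st : Int × Int) number =>
    let z := if number == 0 then st.1 + 1 else st.1
    let s := if z % 2 == 0 then st.2 + number else st.2
    let s := if z % 2 == 1 then s - number else s
    (z, s)) (0, 0)).2

-- ===== PORT B =====
-- Port of B: maintained sign and per-segment subtotal, flushed at each zero and at the end.
def add_or_subtract_alt (numbers : List Int) : Int :=
  let st := numbers.foldl (fun (st : Int × Int × Int) n =>
    let (total, subtotal, sign) := st
    if n == 0 then (total + sign * subtotal, 0, -sign)
    else (total, subtotal + n, sign)) (0, 0, 1)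
  st.1 + st.2.2 * st.2.1

-- ===== PRECONDITION & SPEC =====
def Spec_add_or_subtract (numbers : List Int) (out : Int) : Prop := out = add_or_subtract_alt numbers
instance (numbers : List Int) (out : Int) : Decidable (Spec_add_or_subtract numbers out) := by unfold Spec_add_or_subtract; infer_instance

-- ===== CLAIM (what is proved, stated in full; the proofs are below) =====
def Claim_equal_add_or_subtract : Prop := ∀ (numbers : List Int), Dom_add_or_subtract numbers → Spec_add_or_subtract numbers (add_or_subtract numbers)

-- ===== LEMMAS AND PROOFS =====

-- ===== VERDICT (by name: the statement is the Claim_ definition above) =====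
-- invariant relating A's (zero parity, running sum) to B's (total, subtotal, sign)
theorem loop_inv (numbers : List Int) (z s total subtotal sign : Int)
    (hsign : sign = if z % 2 == 0 then 1 else -1)
    (hs : s = total + sign * subtotal) :
    (numbers.foldl (fun (st : Int × Int) number =>
      let z := if number == 0 then st.1 + 1 else st.1
      let s := if z % 2 == 0 then st.2 + number else st.2
      let s := if z % 2 == 1 then s - number else s
      (z, s)) (z, s)).2
    = (let st := numbers.foldl (fun (st : Int × Int × Int) n =>
        let (total, subtotal, sign) := st
        if n == 0 then (total + sign * subtotal, 0, -sign)
        else (total, subtotal + n, sign)) (total, subtotal, sign)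
       st.1 + st.2.2 * st.2.1) := by
  induction numbers generalizing z s total subtotal sign with
  | nil =>
    simpa using hs
  | cons n tl ih =>
    simp only [List.foldl]
    by_cases hn : n = 0
    · subst hn
      simp only [beq_self_eq_true, if_true]
      refine ih _ _ _ _ _ ?_ ?_
      · simp only [beq_iff_eq] at hsign ⊢
        rcases Int.emod_two_eq z with h | h
        · rw [if_pos h] at hsign; rw [if_neg (by omega)]; omega
        · rw [if_neg (by simp [h])] at hsign; rw [if_pos (by omega)]; omega
      · rw [hs]; split_ifs <;> ring
    · have hb : (n == 0) = false := by simp [hn]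
      simp only [hb, Bool.false_eq_true, if_false]
      refine ih _ _ _ _ _ hsign ?_
      simp only [beq_iff_eq] at hsign
      rcases Int.emod_two_eq z with h | h
      · rw [if_pos h] at hsign
        rw [if_neg (by simp [h]), if_pos (by simp [h])]
        rw [hs, hsign]; ring
      · rw [if_neg (by simp [h])] at hsign
        rw [if_pos (by simp [h]), if_neg (by simp [h])]
        rw [hs, hsign]; ring

theorem add_or_subtract_spec : Claim_equal_add_or_subtract := by
  intro numbers _
  unfold Spec_add_or_subtract add_or_subtract add_or_subtract_alt
  exact loop_inv numbers 0 0 0 0 1 (by decide) (by ring)
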